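-- pv_equiv track=rewrite | github.com/Sujankhyaju/IW_PythonAssignment1 | function/7.py | Count
-- ===== SOURCE A (Python) =====
-- def Count(samp_string):
--     count_C ,count_L = 0,0
--     for i in samp_string:
--         if i.isupper() == True:
--             count_C += 1
--         else:
--             count_L += 1
--
--     return count_C,count_L
-- ===== SOURCE B (Python) =====
-- def Count(samp_string):
--     # Stage 1: build a frequency table of the distinct characters.
--     freq = {}
--     for ch in samp_string:
--         freq[ch] = freq.get(ch, 0) + 1
--     # Stage 2: sum the multiplicities of the (at most ~26) uppercase keys.
--     count_C = 0
--     for ch, n in freq.items():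
--         if ch.isupper():
--             count_C += n
--     # The lowercase/other count is the remainder of the total length.
--     return count_C, len(samp_string) - count_C
-- ===== Notes on version B (the rewrite author's own statement) =====
-- stated objective: alternative
-- what changed: B first builds a character-frequency dictionary of the string, then computes the uppercase total by summing the multiplicities of the uppercase keys of that table, and derives the other count as len(s) - count_C, instead of A's single pass with two branch-updated accumulators.
import Mathlib
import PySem

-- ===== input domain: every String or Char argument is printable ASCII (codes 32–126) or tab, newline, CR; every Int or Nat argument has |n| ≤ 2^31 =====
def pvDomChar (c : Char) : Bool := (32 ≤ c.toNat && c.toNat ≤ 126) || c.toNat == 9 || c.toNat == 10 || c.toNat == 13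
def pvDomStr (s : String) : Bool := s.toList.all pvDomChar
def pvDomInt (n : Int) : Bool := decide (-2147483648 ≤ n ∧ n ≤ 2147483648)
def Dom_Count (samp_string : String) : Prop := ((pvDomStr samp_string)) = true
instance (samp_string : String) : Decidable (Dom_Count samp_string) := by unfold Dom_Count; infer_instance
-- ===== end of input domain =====

-- B builds a character-frequency dictionary first, sums the multiplicities of its uppercase keys,
-- and derives the other count as len - count_C (alternative two-stage algorithm, same O(n) cost).


-- ===== PORT A =====
-- for-loop over the characters with two branch-updated accumulators (count_C, count_L)
def Count (samp_string : String) : Int × Int :=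
  samp_string.toList.foldl
    (fun (a : Int × Int) c =>
      if PySem.Chars.isupper c == true then (a.1 + 1, a.2) else (a.1, a.2 + 1))
    (0, 0)

-- ===== PORT B =====
-- freq = {}; for ch in s: freq[ch] = freq.get(ch, 0) + 1
-- count_C = 0; for ch, n in freq.items(): if ch.isupper(): count_C += n
-- return count_C, len(s) - count_C
def Count_alt (samp_string : String) : Int × Int :=
  let freq : PySem.Dict Char Int :=
    samp_string.toList.foldl (fun d ch => d.insert ch (d.getD ch 0 + 1)) PySem.Dict.empty
  let count_C : Int :=
    freq.items.foldl (fun (a : Int) p => if PySem.Chars.isupper p.1 then a + p.2 else a) 0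
  (count_C, (PySem.Str.len samp_string : Int) - count_C)

-- ===== PRECONDITION & SPEC =====
def Spec_Count (samp_string : String) (out : Int × Int) : Prop := out = Count_alt samp_string
instance (samp_string : String) (out : Int × Int) : Decidable (Spec_Count samp_string out) := by unfold Spec_Count; infer_instance

-- ===== CLAIM (what is proved, stated in full; the proofs are below) =====
def Claim_equal_Count : Prop := ∀ (samp_string : String), Dom_Count samp_string → Spec_Count samp_string (Count samp_string)

-- ===== LEMMAS AND PROOFS =====

-- A's loop counts the uppercase and the non-uppercase characters.
theorem Count_loop (l : List Char) (a : Int × Int) :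
    l.foldl (fun (a : Int × Int) c =>
        if PySem.Chars.isupper c == true then (a.1 + 1, a.2) else (a.1, a.2 + 1)) a
      = (a.1 + (l.countP (fun c => PySem.Chars.isupper c) : Int),
         a.2 + (l.countP (fun c => !PySem.Chars.isupper c) : Int)) := by
  induction l generalizing a with
  | nil => simp
  | cons c t ih =>
    by_cases h : PySem.Chars.isupper c = true
    · rw [List.foldl_cons, if_pos (by simp [h]), ih]
      simp [h, Prod.ext_iff]; ring
    · rw [List.foldl_cons, if_neg (by simp [h]), ih]
      simp [h, Prod.ext_iff]; ring

-- counting members of k :: ks splits off the k-part (k fresh)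
theorem countP_cons_key (p : Char → Bool) (k : Char) (ks : List Char) (hk : k ∉ ks) (xs : List Char) :
    xs.countP (fun x => p x && decide (x ∈ k :: ks))
      = (if p k then xs.count k else 0)
        + xs.countP (fun x => p x && decide (x ∈ ks)) := by
  induction xs with
  | nil => simp
  | cons x t ih =>
    simp only [List.countP_cons, List.count_cons]
    by_cases hxk : x = k <;> by_cases hp : p x <;> by_cases hm : x ∈ ks <;>
      simp [hxk, hp, hm, hk] at * <;> split_ifs at * <;> omega

-- the folded sum over distinct keys of (p k ? count k : 0) is countP of the members
theorem foldl_keys_sum (p : Char → Bool) (xs : List Char) :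
    ∀ (ks : List Char) (init : Int), ks.Nodup →
      ks.foldl (fun (a : Int) k => if p k then a + xs.count k else a) init
        = init + (xs.countP (fun x => p x && decide (x ∈ ks)) : Int) := by
  intro ks
  induction ks with
  | nil => intro init _; simp
  | cons k ks ih =>
    intro init hnd
    rcases List.nodup_cons.mp hnd with ⟨hk, hnd'⟩
    rw [List.foldl_cons, ih _ hnd', countP_cons_key p k ks hk xs]
    split_ifs with hp <;> push_cast <;> ring

-- B's count_C equals A's uppercase count
theorem count_C_eq (xs : List Char) :
    ((xs.foldl (fun d ch => d.insert ch (d.getD ch 0 + 1)) PySem.Dict.empty).items).foldl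
        (fun (a : Int) p => if PySem.Chars.isupper p.1 then a + p.2 else a) 0
      = (xs.countP (fun c => PySem.Chars.isupper c) : Int) := by
  rw [PySem.Dict.foldl_insert_getD_add_one_eq_counter, PySem.Dict.items_counter,
    List.foldl_map]
  rw [foldl_keys_sum (fun c => PySem.Chars.isupper c) xs (PySem.Set.ofList xs) 0
    (PySem.Set.nodup_ofList xs)]
  have hfilt : (xs.countP (fun x => PySem.Chars.isupper x && decide (x ∈ PySem.Set.ofList xs)))
      = xs.countP (fun c => PySem.Chars.isupper c) := by
    apply List.countP_congr
    intro x hx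
    simp [PySem.Set.mem_ofList, hx]
  rw [hfilt]; ring

-- ===== VERDICT (by name: the statement is the Claim_ definition above) =====
theorem Count_spec : Claim_equal_Count := by
  intro s _
  show Count s = Count_alt s
  unfold Count Count_alt
  rw [Count_loop]
  simp only [count_C_eq]
  have hsplit : s.toList.countP (fun c => PySem.Chars.isupper c)
      + s.toList.countP (fun c => !PySem.Chars.isupper c) = s.toList.length := by
    induction s.toList with
    | nil => simp
    | cons c t ih =>
      by_cases h : PySem.Chars.isupper c = true <;> simp [h] <;> omega
  have h3 : s.toList.length = s.length := by simp
  simp only [PySem.Str.len, Prod.mk.injEq, zero_add]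
  refine ⟨trivial, ?_⟩
  omega
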